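-- pv_equiv track=rewrite | github.com/antonyleh/hermite-nash-tsp-lattice | tsp/tsp/approx.py | solve_tsp_2approx
-- ===== SOURCE A (Python) =====
-- def solve_tsp_2approx(coords, dist):
--     """
--     Algorithme 2-approx:
--       1) Construire un MST (ici version Kruskal)
--       2) Effectuer un DFS depuis la racine (0) pour lister les sommets
--       3) Fermer le circuit en revenant à 0
--     """
--     noeud  = list(coords.keys())  # ex. 0..n
--     # Création d'une liste d'arêtes (poids, i, j)
--     aretes = []
--     for i in noeud :
--         for j in noeud :
--             if i < j:
--                 aretes.append((dist[(i,j)], i, j))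
--
--
--     # Tri des arêtes par poids
--     aretes.sort(key=lambda e: e[0])
--
--     # Structure pour l'union-find
--     parent = {v: v for v in noeud }
--     rang = {v: 0 for v in noeud }
--
--
--     def find(v):
--         """
--         Trouve le représentant (chef) de la composante de v.
--         Si parent[v] != v, on met à jour parent[v] pour compresser le chemin.
--         """
--
--         if parent[v] != v:
--             parent[v] = find(parent[v])
--         return parent[v]
--
--     def union(a, b):
--         """
--         Fusionne les composantes de a et de b si elles sont distinctes.
--         On utilise le rang pour attacher l'arbre le plus petit sous le plus grand.
--         """
--
--         parentA = find(a)
--         parentB = find(b)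
--         if parentA != parentB:
--             if rang[parentA] < rang[parentB]:
--                 parent[parentA] = parentB
--             elif rang[parentA] > rang[parentB]:
--                 parent[parentB] = parentA
--             else:
--                 parent[parentB] = parentA
--                 rang[parentA] += 1
--
--     # Construit l'arbre couvrant minimal sous forme d'une liste d'adjacence
--     arbre_couvr_min = {v: [] for v in noeud }
--     for w, i, j in aretes:
--         # Si i et j ne sont pas déjà connectés (ce qui éviterait une boucle), alors on peut les relier.
--         if find(i) != find(j):
--             union(i, j)
--             arbre_couvr_min[i].append(j)
--             arbre_couvr_min[j].append(i)
--
--     # DFS pour créer un ordre de visite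
--     visited = []
--     def dfs(u):
--         visited.append(u)
--         for v in arbre_couvr_min[u]:
--             if v not in visited:
--                 dfs(v)
--
--     dfs(0)  # part du centre (0)
--
--     # On "ferme" le cycle en revenant au centre
--     visited.append(0)
--
--     return visited
-- ===== SOURCE B (Python) =====
-- def solve_tsp_2approx(coords, dist):
--     """
--     Same 2-approx TSP (Kruskal MST + preorder walk from 0), restructured:
--     iterative path-compressing find instead of recursion, a swap-style union,
--     Kruskal first SELECTS the MST edges and the adjacency lists are built in a
--     separate second pass, and the DFS is an explicit stack-based iterative
--     preorder instead of a recursive closure.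
--     """
--     noeud = list(coords.keys())
--     aretes = sorted(
--         [(dist[(i, j)], i, j) for i in noeud for j in noeud if i < j],
--         key=lambda e: e[0])
--
--     parent = {v: v for v in noeud}
--     rang = {v: 0 for v in noeud}
--
--     def find(v):
--         # iterative: chase to the root collecting the path, then compress it
--         path = []
--         while parent[v] != v:
--             path.append(v)
--             v = parent[v]
--         for x in path:
--             parent[x] = v
--         return v
--
--     def union(a, b):
--         ra = find(a)
--         rb = find(b)
--         if ra == rb:
--             return
--         if rang[ra] < rang[rb]:
--             ra, rb = rb, ra
--         parent[rb] = ra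
--         if rang[ra] == rang[rb]:
--             rang[ra] += 1
--
--     # pass 1: Kruskal selects the MST edges
--     mst = []
--     for w, i, j in aretes:
--         ri = find(i)
--         rj = find(j)
--         if ri != rj:
--             union(i, j)
--             mst.append((i, j))
--
--     # pass 2: build the adjacency lists from the selected edges
--     adj = {v: [] for v in noeud}
--     for i, j in mst:
--         adj[i].append(j)
--         adj[j].append(i)
--
--     # iterative preorder DFS with an explicit stack
--     visited = []
--     stack = [0]
--     while stack:
--         u = stack.pop()
--         if u not in visited:
--             visited.append(u)
--             stack.extend(reversed(adj[u]))
--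
--     visited.append(0)
--     return visited
-- ===== Notes on version B (the rewrite author's own statement) =====
-- stated objective: alternative
-- what changed: B rebuilds the pipeline with different mechanics: edges come from one comprehension instead of nested append loops, find is an iterative chase-then-compress loop instead of recursion, union swaps roots instead of a three-way rank branch, Kruskal first selects the MST edge list and the adjacency dict is built in a separate second pass, and the DFS is an explicit stack-based iterative preorder instead of a recursive closure.
import Mathlib
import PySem

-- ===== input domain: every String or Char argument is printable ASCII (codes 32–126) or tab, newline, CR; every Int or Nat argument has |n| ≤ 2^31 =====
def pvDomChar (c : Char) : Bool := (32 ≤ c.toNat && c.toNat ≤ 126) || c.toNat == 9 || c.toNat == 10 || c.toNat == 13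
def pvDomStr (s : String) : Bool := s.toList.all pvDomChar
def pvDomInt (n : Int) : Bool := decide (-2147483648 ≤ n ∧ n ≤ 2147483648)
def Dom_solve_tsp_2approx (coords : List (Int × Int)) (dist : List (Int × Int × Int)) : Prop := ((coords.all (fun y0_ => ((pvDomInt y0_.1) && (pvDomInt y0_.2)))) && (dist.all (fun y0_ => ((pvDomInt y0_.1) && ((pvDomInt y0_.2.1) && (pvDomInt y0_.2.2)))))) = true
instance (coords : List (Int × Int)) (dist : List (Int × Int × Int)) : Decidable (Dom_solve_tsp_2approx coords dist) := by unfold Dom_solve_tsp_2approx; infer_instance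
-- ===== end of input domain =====

-- B restructures the same 2-approx pipeline: edge list by comprehension, an
-- iterative chase-then-compress find, a swap-style union, Kruskal split into
-- "select MST edges" then "build adjacency", and a stack-based iterative DFS.

-- ===== PORT A =====
def pvKeys (coords : List (Int × Int)) : List Int := (PySem.Dict.ofList coords).keys

def pvEdges (noeud : List Int) (dd : PySem.Dict (Int × Int) Int) : List (Int × Int × Int) :=
  noeud.foldl (fun acc i =>
    noeud.foldl (fun acc j =>
      if i < j then acc ++ [(dd.getD (i, j) 0, i, j)] else acc) acc) []

-- find(v) with path compression; the fuel only makes the recursion total (every parent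
-- chain in a run is shorter than the fuel passed)
def pvFind : Nat → PySem.Dict Int Int → Int → PySem.Dict Int Int × Int
  | 0, parent, v => (parent, parent.getD v v)
  | f+1, parent, v =>
    let p := parent.getD v v
    if p ≠ v then
      let r := pvFind f parent p
      (r.1.insert v r.2, r.2)
    else (parent, v)

def pvUnion (f : Nat) (parent : PySem.Dict Int Int) (rang : PySem.Dict Int Int) (a b : Int) :
    PySem.Dict Int Int × PySem.Dict Int Int :=
  let r1 := pvFind f parent a
  let r2 := pvFind f r1.1 b
  let pA := r1.2
  let pB := r2.2
  if pA ≠ pB then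
    if rang.getD pA 0 < rang.getD pB 0 then (r2.1.insert pA pB, rang)
    else if rang.getD pB 0 < rang.getD pA 0 then (r2.1.insert pB pA, rang)
    else (r2.1.insert pB pA, rang.insert pA (rang.getD pA 0 + 1))
  else (r2.1, rang)

def pvKStep (f : Nat)
    (st : PySem.Dict Int Int × PySem.Dict Int Int × PySem.Dict Int (List Int))
    (e : Int × Int × Int) :
    PySem.Dict Int Int × PySem.Dict Int Int × PySem.Dict Int (List Int) :=
  let i := e.2.1
  let j := e.2.2
  let r1 := pvFind f st.1 i
  let r2 := pvFind f r1.1 j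
  if r1.2 ≠ r2.2 then
    let pr := pvUnion f r2.1 st.2.1 i j
    (pr.1, pr.2, (st.2.2.modify i [] (· ++ [j])).modify j [] (· ++ [i]))
  else (r2.1, st.2.1, st.2.2)

def pvKruskal (f : Nat) (noeud : List Int) (aretes : List (Int × Int × Int)) :
    PySem.Dict Int (List Int) :=
  let init : PySem.Dict Int Int × PySem.Dict Int Int × PySem.Dict Int (List Int) :=
    (PySem.Dict.ofList (noeud.map (fun v => (v, v))),
     PySem.Dict.ofList (noeud.map (fun v => (v, (0 : Int)))),
     PySem.Dict.ofList (noeud.map (fun v => (v, ([] : List Int)))))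
  (aretes.foldl (pvKStep f) init).2.2

def pvBuildAdj (coords : List (Int × Int)) (dist : List (Int × Int × Int)) :
    List Int × PySem.Dict Int (List Int) :=
  let noeud := pvKeys coords
  let dd := PySem.Dict.ofList (dist.map (fun t => ((t.1, t.2.1), t.2.2)))
  let aretes := PySem.List.sorted (pvEdges noeud dd) (fun e => e.1)
  (noeud, pvKruskal (noeud.length + 1) noeud aretes)

-- A's recursive dfs with its visited accumulator; the fuel only makes the recursion
-- total (the nesting depth of the Python recursion is bounded by the number of nodes)
mutual
def pvDfsA (adj : PySem.Dict Int (List Int)) : Nat → List Int → Int → List Int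
  | 0, vis, u => vis ++ [u]
  | f+1, vis, u => pvLoopA adj f (vis ++ [u]) (adj.getD u [])
  termination_by f _ _ => (f, 0)
def pvLoopA (adj : PySem.Dict Int (List Int)) : Nat → List Int → List Int → List Int
  | _, acc, [] => acc
  | f, acc, v :: vs => pvLoopA adj f (if v ∈ acc then acc else pvDfsA adj f acc v) vs
  termination_by f _ vs => (f, vs.length + 1)
end

def solve_tsp_2approx (coords : List (Int × Int)) (dist : List (Int × Int × Int)) : List Int :=
  let nd := pvBuildAdj coords dist
  pvDfsA nd.2 (nd.1.length + 1) [] 0 ++ [0]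

-- ===== PORT B =====
-- B's while-loop chase to the root, recording the path (the fuel only makes the
-- loop total; exact wherever the Python loop terminates)
def pvChase : Nat → PySem.Dict Int Int → Int → List Int → List Int × Int
  | 0, parent, v, path => (path, parent.getD v v)
  | f+1, parent, v, path =>
    let p := parent.getD v v
    if p = v then (path, v) else pvChase f parent p (path ++ [v])

-- B's iterative find: collect the path, then compress it in one forward pass
def pvFindB (f : Nat) (parent : PySem.Dict Int Int) (v : Int) :
    PySem.Dict Int Int × Int :=
  let pr := pvChase f parent v []
  (pr.1.foldl (fun d x => d.insert x pr.2) parent, pr.2)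

-- B's union: swap the roots so the smaller-rank root is attached under the other
def pvUnionB (f : Nat) (parent rang : PySem.Dict Int Int) (a b : Int) :
    PySem.Dict Int Int × PySem.Dict Int Int :=
  let r1 := pvFindB f parent a
  let r2 := pvFindB f r1.1 b
  if r1.2 = r2.2 then (r2.1, rang)
  else
    let s := if rang.getD r1.2 0 < rang.getD r2.2 0 then (r2.2, r1.2) else (r1.2, r2.2)
    let parent' := r2.1.insert s.2 s.1
    if rang.getD s.1 0 = rang.getD s.2 0 then (parent', rang.insert s.1 (rang.getD s.1 0 + 1))
    else (parent', rang)

-- pass 1 of B's Kruskal: select the MST edges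
def pvSelect (f : Nat)
    (st : PySem.Dict Int Int × PySem.Dict Int Int × List (Int × Int))
    (e : Int × Int × Int) :
    PySem.Dict Int Int × PySem.Dict Int Int × List (Int × Int) :=
  let r1 := pvFindB f st.1 e.2.1
  let r2 := pvFindB f r1.1 e.2.2
  if r1.2 ≠ r2.2 then
    let pr := pvUnionB f r2.1 st.2.1 e.2.1 e.2.2
    (pr.1, pr.2, st.2.2 ++ [(e.2.1, e.2.2)])
  else (r2.1, st.2.1, st.2.2)

-- pass 2 of B's Kruskal: record one selected edge in the adjacency dict
def pvAddAdj (d : PySem.Dict Int (List Int)) (e : Int × Int) : PySem.Dict Int (List Int) :=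
  (d.modify e.1 [] (· ++ [e.2])).modify e.2 [] (· ++ [e.1])

-- termination helpers for B's DFS while loop (cited by pvDfsB's decreasing_by)
theorem pv_sum_filter (g : Int → Nat) (l : List Int) :
    ∀ (vis : List Int) (u : Int), u ∉ vis →
      (if u ∈ l then g u else 0)
        + ((l.filter (fun k => !decide (k ∈ vis ++ [u]))).map g).sum
        ≤ ((l.filter (fun k => !decide (k ∈ vis))).map g).sum := by
  induction l with
  | nil => intro vis u _; simp
  | cons x l ih =>
    intro vis u hu
    by_cases hx : x = u
    · subst hx
      rw [List.filter_cons_of_neg (by simp), List.filter_cons_of_pos (by simp [hu]),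
        if_pos (List.mem_cons_self)]
      simp only [List.map_cons, List.sum_cons]
      have h := ih vis x hu
      by_cases hul : x ∈ l
      · rw [if_pos hul] at h; omega
      · rw [if_neg hul] at h; omega
    · have hiff : u ∈ x :: l ↔ u ∈ l := by
        constructor
        · intro h; rcases List.mem_cons.mp h with h | h
          · exact absurd h.symm hx
          · exact h
        · exact List.mem_cons_of_mem x
      have h := ih vis u hu
      by_cases hxv : x ∈ vis
      · rw [List.filter_cons_of_neg (by simp [hxv]),
          List.filter_cons_of_neg (by simp [hxv])]
        by_cases hul : u ∈ l
        · rw [if_pos (hiff.mpr hul)]; rw [if_pos hul] at h; omega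
        · rw [if_neg (fun hc => hul (hiff.mp hc))]; rw [if_neg hul] at h; omega
      · have hx2 : ¬ x ∈ vis ++ [u] := by
          intro hc
          rcases List.mem_append.mp hc with hc | hc
          · exact hxv hc
          · exact hx (List.mem_singleton.mp hc)
        rw [List.filter_cons_of_pos (by simp [hx2]),
          List.filter_cons_of_pos (by simp [hxv])]
        simp only [List.map_cons, List.sum_cons]
        by_cases hul : u ∈ l
        · rw [if_pos (hiff.mpr hul)]; rw [if_pos hul] at h; omega
        · rw [if_neg (fun hc => hul (hiff.mp hc))]; rw [if_neg hul] at h; omega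

theorem pv_getD_not_key {ν : Type} (d : PySem.Dict Int ν) (k : Int) (dflt : ν)
    (h : k ∉ d.keys) : d.getD k dflt = dflt := by
  have hf : d.items.find? (fun p => p.1 == k) = none := by
    apply List.find?_eq_none.mpr
    intro p hp hbeq
    exact h (by
      simp only [PySem.Dict.keys, List.mem_map]
      exact ⟨p, hp, by simpa using hbeq⟩)
  simp [PySem.Dict.getD, PySem.Dict.get?, hf]

theorem pv_push_le (adj : PySem.Dict Int (List Int)) (vis : List Int) (u : Int)
    (hu : u ∉ vis) :
    (adj.getD u []).length
      + ((adj.keys.filter (fun k => !decide (k ∈ vis ++ [u]))).map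
          (fun k => (adj.getD k []).length)).sum
      ≤ ((adj.keys.filter (fun k => !decide (k ∈ vis))).map
          (fun k => (adj.getD k []).length)).sum := by
  have h := pv_sum_filter (fun k => (adj.getD k []).length) adj.keys vis u hu
  by_cases hk : u ∈ adj.keys
  · rw [if_pos hk] at h; exact h
  · rw [if_neg hk] at h
    rw [pv_getD_not_key adj u [] hk]
    simpa using h

-- B's iterative preorder DFS: the list holds the Python stack top-first, so
-- 'u = stack.pop()' is the head and 'stack.extend(reversed(arbre_couvr_min[u]))'
-- places adj[u] in order at the head
def pvDfsB (adj : PySem.Dict Int (List Int)) : List Int → List Int → List Int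
  | vis, [] => vis
  | vis, u :: st =>
    if u ∈ vis then pvDfsB adj vis st
    else pvDfsB adj (vis ++ [u]) (adj.getD u [] ++ st)
  termination_by vis stack =>
    stack.length + ((adj.keys.filter (fun k => !decide (k ∈ vis))).map
      (fun k => (adj.getD k []).length)).sum
  decreasing_by
  · simp
  · simp only [List.length_append, List.length_cons]
    have := pv_push_le adj vis u (by assumption)
    omega

def solve_tsp_2approx_alt (coords : List (Int × Int)) (dist : List (Int × Int × Int)) : List Int :=
  let noeud := (PySem.Dict.ofList coords).keys
  let dd := PySem.Dict.ofList (dist.map (fun t => ((t.1, t.2.1), t.2.2)))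
  let aretes := PySem.List.sorted
    (noeud.flatMap (fun i => (noeud.filter (fun j => decide (i < j))).map
      (fun j => (dd.getD (i, j) 0, i, j)))) (fun e => e.1)
  let sel := aretes.foldl (pvSelect (noeud.length + 1))
    (PySem.Dict.ofList (noeud.map (fun v => (v, v))),
     PySem.Dict.ofList (noeud.map (fun v => (v, (0 : Int)))),
     ([] : List (Int × Int)))
  let adj := sel.2.2.foldl pvAddAdj
    (PySem.Dict.ofList (noeud.map (fun v => (v, ([] : List Int)))))
  pvDfsB adj [] [0] ++ [0]

-- ===== PRECONDITION & SPEC =====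
-- Pre_ excludes exactly the inputs on which the Python raises KeyError: node 0 missing
-- from coords (dfs(0) reads arbre_couvr_min[0]), or a pair i < j of nodes whose
-- distance is missing from dist (dist[(i,j)]).
def Pre_solve_tsp_2approx (coords : List (Int × Int)) (dist : List (Int × Int × Int)) : Prop :=
  (0 : Int) ∈ coords.map Prod.fst ∧
  ∀ i ∈ coords.map Prod.fst, ∀ j ∈ coords.map Prod.fst,
    i < j → (i, j) ∈ dist.map (fun t => (t.1, t.2.1))
instance (coords : List (Int × Int)) (dist : List (Int × Int × Int)) :
    Decidable (Pre_solve_tsp_2approx coords dist) := by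
  unfold Pre_solve_tsp_2approx; infer_instance

def pvWitness_solve_tsp_2approx : (List (Int × Int)) × (List (Int × Int × Int)) :=
  ([(0, 0), (1, 0), (2, 0)], [(0, 1, 3), (0, 2, 1), (1, 2, 1)])

def Spec_solve_tsp_2approx (coords : List (Int × Int)) (dist : List (Int × Int × Int)) (out : List Int) : Prop := out = solve_tsp_2approx_alt coords dist
instance (coords : List (Int × Int)) (dist : List (Int × Int × Int)) (out : List Int) : Decidable (Spec_solve_tsp_2approx coords dist out) := by unfold Spec_solve_tsp_2approx; infer_instance

-- ===== CLAIM (what is proved, stated in full; the proofs are below) =====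
def Claim_equal_solve_tsp_2approx : Prop := ∀ (coords : List (Int × Int)) (dist : List (Int × Int × Int)), Dom_solve_tsp_2approx coords dist → Pre_solve_tsp_2approx coords dist → Spec_solve_tsp_2approx coords dist (solve_tsp_2approx coords dist)

-- ===== LEMMAS AND PROOFS =====

theorem pv_witness_ok :
    Dom_solve_tsp_2approx pvWitness_solve_tsp_2approx.1 pvWitness_solve_tsp_2approx.2 ∧
    Pre_solve_tsp_2approx pvWitness_solve_tsp_2approx.1 pvWitness_solve_tsp_2approx.2 := by
  constructor <;> decide

-- ---- B's find equals A's find (on every state, for every fuel) ----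

theorem pv_contains_of_getD_ne (d : PySem.Dict Int Int) (v : Int)
    (h : d.getD v v ≠ v) : d.contains v = true := by
  by_cases hc : d.contains v = true
  · exact hc
  · exact absurd (PySem.Dict.getD_of_not_contains d v (by simpa using hc)) h

theorem pv_ins_comm (d : PySem.Dict Int Int) (x y r : Int)
    (hx : d.contains x = true) (hy : d.contains y = true) :
    (d.insert y r).insert x r = (d.insert x r).insert y r := by
  apply PySem.Dict.ext
  rw [PySem.Dict.items_insert_of_contains _ r
      (by simp [PySem.Dict.contains_insert, hx] : (d.insert y r).contains x = true),
    PySem.Dict.items_insert_of_contains _ r hy,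
    PySem.Dict.items_insert_of_contains _ r
      (by simp [PySem.Dict.contains_insert, hy] : (d.insert x r).contains y = true),
    PySem.Dict.items_insert_of_contains _ r hx, List.map_map, List.map_map]
  apply List.map_congr_left
  intro p _
  by_cases h1 : p.1 = x
  · by_cases h2 : p.1 = y
    · have hxy : x = y := by rw [← h1, h2]
      subst hxy
      simp [h1]
    · have hne : x ≠ y := fun he => h2 (h1.trans he)
      simp [h1, hne]
  · by_cases h2 : p.1 = y
    · have hne : y ≠ x := fun he => h1 (h2.trans he)
      simp [h2, hne]
    · simp [h1, h2]

theorem pv_ins_foldl (r : Int) :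
    ∀ (l : List Int) (d : PySem.Dict Int Int) (x : Int),
      d.contains x = true → (∀ y ∈ l, d.contains y = true) →
      (l.foldl (fun d k => d.insert k r) d).insert x r
        = l.foldl (fun d k => d.insert k r) (d.insert x r) := by
  intro l
  induction l with
  | nil => intro d x _ _; simp
  | cons y l ih =>
    intro d x hx hl
    simp only [List.foldl_cons]
    rw [ih (d.insert y r) x (by simp [PySem.Dict.contains_insert, hx])
      (fun z hz => by simp [PySem.Dict.contains_insert, hl z (List.mem_cons_of_mem y hz)]),
      pv_ins_comm d x y r hx (hl y List.mem_cons_self)]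

theorem pv_chase_acc (parent : PySem.Dict Int Int) :
    ∀ (f : Nat) (v : Int) (acc : List Int),
      pvChase f parent v acc
        = (acc ++ (pvChase f parent v []).1, (pvChase f parent v []).2) := by
  intro f
  induction f with
  | zero => intro v acc; simp [pvChase]
  | succ f ih =>
    intro v acc
    rw [pvChase, pvChase]
    by_cases h : parent.getD v v = v
    · rw [if_pos h, if_pos h]; simp
    · rw [if_neg h, if_neg h, ih (parent.getD v v) (acc ++ [v]),
        ih (parent.getD v v) ([] ++ [v])]
      simp

theorem pv_chase_keys (parent : PySem.Dict Int Int) :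
    ∀ (f : Nat) (v : Int) (acc : List Int),
      (∀ x ∈ acc, parent.contains x = true) →
      ∀ x ∈ (pvChase f parent v acc).1, parent.contains x = true := by
  intro f
  induction f with
  | zero => intro v acc hacc; exact hacc
  | succ f ih =>
    intro v acc hacc
    rw [pvChase]
    by_cases h : parent.getD v v = v
    · rw [if_pos h]; exact hacc
    · rw [if_neg h]
      apply ih
      intro x hx
      rcases List.mem_append.mp hx with hx | hx
      · exact hacc x hx
      · rw [List.mem_singleton.mp hx]
        exact pv_contains_of_getD_ne parent v h

theorem pv_findB_eq (parent : PySem.Dict Int Int) :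
    ∀ (f : Nat) (v : Int), pvFindB f parent v = pvFind f parent v := by
  intro f
  induction f with
  | zero => intro v; simp [pvFindB, pvChase, pvFind]
  | succ f ih =>
    intro v
    rw [pvFindB, pvFind]
    dsimp only
    by_cases h : parent.getD v v = v
    · rw [pvChase]
      rw [if_pos h, if_neg (by simpa using h)]
      simp
    · rw [if_pos (by simpa using h)]
      have hch : pvChase (f + 1) parent v []
          = ([v] ++ (pvChase f parent (parent.getD v v) []).1,
             (pvChase f parent (parent.getD v v) []).2) := by
        rw [pvChase]
        rw [if_neg h, pv_chase_acc parent f (parent.getD v v) ([] ++ [v])]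
        simp
      rw [← ih (parent.getD v v), pvFindB]
      rw [hch]
      dsimp only
      rw [List.singleton_append, List.foldl_cons]
      rw [← pv_ins_foldl _ _ parent v (pv_contains_of_getD_ne parent v h)
        (pv_chase_keys parent f (parent.getD v v) [] (by intro x hx; cases hx))]

theorem pv_unionB_eq (f : Nat) (parent rang : PySem.Dict Int Int) (a b : Int) :
    pvUnionB f parent rang a b = pvUnion f parent rang a b := by
  rw [pvUnionB, pvUnion]
  simp only [pv_findB_eq]
  set r1 := pvFind f parent a
  set r2 := pvFind f r1.1 b
  by_cases h : r1.2 = r2.2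
  · simp [h]
  · rcases lt_trichotomy (rang.getD r1.2 0) (rang.getD r2.2 0) with hlt | heq | hgt
    · rw [if_neg h, if_pos (show ¬r1.2 = r2.2 from h), if_pos hlt, if_pos hlt]
      rw [if_neg (show ¬rang.getD (r2.2, r1.2).1 0 = rang.getD (r2.2, r1.2).2 0 by
        dsimp only; omega)]
    · rw [if_neg h, if_pos (show ¬r1.2 = r2.2 from h),
        if_neg (show ¬rang.getD r1.2 0 < rang.getD r2.2 0 by omega),
        if_neg (show ¬rang.getD r1.2 0 < rang.getD r2.2 0 by omega),
        if_neg (show ¬rang.getD r2.2 0 < rang.getD r1.2 0 by omega)]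
      rw [if_pos (show rang.getD (r1.2, r2.2).1 0 = rang.getD (r1.2, r2.2).2 0 by
        dsimp only; omega)]
    · rw [if_neg h, if_pos (show ¬r1.2 = r2.2 from h),
        if_neg (show ¬rang.getD r1.2 0 < rang.getD r2.2 0 by omega),
        if_neg (show ¬rang.getD r1.2 0 < rang.getD r2.2 0 by omega), if_pos hgt]
      rw [if_neg (show ¬rang.getD (r1.2, r2.2).1 0 = rang.getD (r1.2, r2.2).2 0 by
        dsimp only; omega)]

-- ---- A's fused Kruskal fold equals B's select-then-build passes ----

theorem pv_fold_sim (f : Nat) (adj0 : PySem.Dict Int (List Int)) :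
    ∀ (l : List (Int × Int × Int)) (p rg : PySem.Dict Int Int) (mst : List (Int × Int)),
      l.foldl (pvKStep f) (p, rg, mst.foldl pvAddAdj adj0)
        = ((l.foldl (pvSelect f) (p, rg, mst)).1,
           (l.foldl (pvSelect f) (p, rg, mst)).2.1,
           (l.foldl (pvSelect f) (p, rg, mst)).2.2.foldl pvAddAdj adj0) := by
  intro l
  induction l with
  | nil => intro p rg mst; rfl
  | cons e l ih =>
    intro p rg mst
    simp only [List.foldl_cons]
    rw [pvKStep, pvSelect]
    simp only [pv_findB_eq, pv_unionB_eq]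
    by_cases h : (pvFind f p e.2.1).2 = (pvFind f (pvFind f p e.2.1).1 e.2.2).2
    · rw [if_neg (by simpa using h), if_neg (by simpa using h)]
      exact ih _ _ _
    · rw [if_pos (by simpa using h), if_pos (by simpa using h)]
      have hadj : (((mst.foldl pvAddAdj adj0).modify e.2.1 [] (· ++ [e.2.2])).modify
            e.2.2 [] (· ++ [e.2.1]))
          = (mst ++ [(e.2.1, e.2.2)]).foldl pvAddAdj adj0 := by
        rw [List.foldl_append]
        rfl
      rw [hadj]
      exact ih _ _ _

-- ---- A's edge enumeration equals B's comprehension ----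

theorem pv_edges_inner_eq (dd : PySem.Dict (Int × Int) Int) (i : Int) :
    ∀ (l : List Int) (acc : List (Int × Int × Int)),
      l.foldl (fun acc j => if i < j then acc ++ [(dd.getD (i, j) 0, i, j)] else acc) acc
        = acc ++ (l.filter (fun j => decide (i < j))).map (fun j => (dd.getD (i, j) 0, i, j)) := by
  intro l
  induction l with
  | nil => intro acc; simp
  | cons j l ih =>
    intro acc
    simp only [List.foldl_cons]
    by_cases h : i < j
    · rw [if_pos h, ih, List.filter_cons_of_pos (by simpa using h)]
      simp
    · rw [if_neg h, ih, List.filter_cons_of_neg (by simpa using h)]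

theorem pv_edges_eq (noeud : List Int) (dd : PySem.Dict (Int × Int) Int) :
    pvEdges noeud dd
      = noeud.flatMap (fun i => (noeud.filter (fun j => decide (i < j))).map
          (fun j => (dd.getD (i, j) 0, i, j))) := by
  rw [pvEdges]
  have main : ∀ (l : List Int) (acc : List (Int × Int × Int)),
      l.foldl (fun acc i => noeud.foldl (fun acc j =>
          if i < j then acc ++ [(dd.getD (i, j) 0, i, j)] else acc) acc) acc
        = acc ++ l.flatMap (fun i => (noeud.filter (fun j => decide (i < j))).map
            (fun j => (dd.getD (i, j) 0, i, j))) := by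
    intro l
    induction l with
    | nil => intro acc; simp
    | cons i l ih =>
      intro acc
      simp only [List.foldl_cons]
      rw [pv_edges_inner_eq dd i noeud acc, ih, List.flatMap_cons, List.append_assoc]
  rw [main noeud []]
  simp

-- B's whole pipeline computes A's adjacency dict (so the two DFS walks read the same data)
theorem pv_alt_adj (coords : List (Int × Int)) (dist : List (Int × Int × Int)) :
    solve_tsp_2approx_alt coords dist
      = pvDfsB (pvBuildAdj coords dist).2 [] [0] ++ [0] := by
  rw [solve_tsp_2approx_alt]
  rw [← pv_edges_eq, pvBuildAdj]
  dsimp only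
  rw [pvKruskal, pvKeys]
  have h := pv_fold_sim ((PySem.Dict.ofList coords).keys.length + 1)
    (PySem.Dict.ofList (((PySem.Dict.ofList coords).keys).map (fun v => (v, ([] : List Int)))))
    (PySem.List.sorted
      (pvEdges (PySem.Dict.ofList coords).keys
        (PySem.Dict.ofList (dist.map (fun t => ((t.1, t.2.1), t.2.2))))) (fun e => e.1))
    (PySem.Dict.ofList (((PySem.Dict.ofList coords).keys).map (fun v => (v, v))))
    (PySem.Dict.ofList (((PySem.Dict.ofList coords).keys).map (fun v => (v, (0 : Int))))) []
  simp only [List.foldl_nil] at h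
  rw [h]

-- ---- the DFS bridge: A's recursive walk = B's stack walk (from the old proof) ----

theorem pv_len_one (s : List Int) : (s.map (fun _ => (1:Nat))).sum = s.length := by
  induction s with
  | nil => simp
  | cons x s ih => simp; omega

theorem pv_mA_mono (l acc t : List Int) :
    (l.filter (fun k => !decide (k ∈ acc ++ t))).length
      ≤ (l.filter (fun k => !decide (k ∈ acc))).length := by
  rw [← List.countP_eq_length_filter, ← List.countP_eq_length_filter]
  apply List.countP_mono_left
  intro x _ h
  simp only [Bool.not_eq_true', decide_eq_false_iff_not] at h ⊢
  exact fun hc => h (List.mem_append_left _ hc)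

theorem pv_mA_lt (l vis : List Int) (u : Int) (hul : u ∈ l) (hu : u ∉ vis) :
    (l.filter (fun k => !decide (k ∈ vis ++ [u]))).length
      < (l.filter (fun k => !decide (k ∈ vis))).length := by
  have h := pv_sum_filter (fun _ => 1) l vis u hu
  rw [if_pos hul, pv_len_one, pv_len_one] at h
  simp only [] at h
  omega

-- both of A's dfs results extend the visited list they are passed
theorem pv_prefix (adj : PySem.Dict Int (List Int)) :
    ∀ f : Nat,
      (∀ acc u, ∃ t, pvDfsA adj f acc u = acc ++ t) ∧
      (∀ vs acc, ∃ t, pvLoopA adj f acc vs = acc ++ t) := by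
  intro f
  induction f using Nat.strong_induction_on with
  | _ f IH =>
    have hrec : ∀ acc u, ∃ t, pvDfsA adj f acc u = acc ++ t := by
      intro acc u
      cases f with
      | zero => exact ⟨[u], by simp [pvDfsA]⟩
      | succ f' =>
        obtain ⟨t, ht⟩ := (IH f' (by omega)).2 (adj.getD u []) (acc ++ [u])
        exact ⟨[u] ++ t, by rw [pvDfsA, ht]; simp⟩
    refine ⟨hrec, ?_⟩
    intro vs
    induction vs with
    | nil => intro acc; exact ⟨[], by simp [pvLoopA]⟩
    | cons v vs ihvs =>
      intro acc
      by_cases hv : v ∈ acc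
      · obtain ⟨t, ht⟩ := ihvs acc
        exact ⟨t, by rw [pvLoopA, if_pos hv]; exact ht⟩
      · obtain ⟨t1, ht1⟩ := hrec acc v
        obtain ⟨t2, ht2⟩ := ihvs (pvDfsA adj f acc v)
        exact ⟨t1 ++ t2, by rw [pvLoopA, if_neg hv, ht2, ht1, List.append_assoc]⟩

-- the bridge: draining a block of pending neighbours from B's explicit stack is
-- exactly A's recursive neighbour loop
theorem pv_inner (adj : PySem.Dict Int (List Int))
    (H : ∀ u v, v ∈ adj.getD u [] → v ∈ adj.keys) :
    ∀ f : Nat, ∀ vs acc st, (∀ v ∈ vs, v ∈ adj.keys) →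
      (adj.keys.filter (fun k => !decide (k ∈ acc))).length ≤ f →
      pvDfsB adj acc (vs ++ st) = pvDfsB adj (pvLoopA adj f acc vs) st := by
  intro f
  induction f using Nat.strong_induction_on with
  | _ f IH =>
    intro vs
    induction vs with
    | nil => intro acc st _ _; rw [List.nil_append, pvLoopA]
    | cons v vs ihvs =>
      intro acc st hmem hf
      by_cases hv : v ∈ acc
      · rw [List.cons_append, pvDfsB, if_pos hv, pvLoopA, if_pos hv]
        exact ihvs acc st (fun w hw => hmem w (List.mem_cons_of_mem v hw)) hf
      · have hvk : v ∈ adj.keys := hmem v List.mem_cons_self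
        have hlt := pv_mA_lt adj.keys acc v hvk hv
        cases f with
        | zero => omega
        | succ f' =>
          have h1 : pvDfsB adj acc (v :: vs ++ st)
              = pvDfsB adj (acc ++ [v]) (adj.getD v [] ++ (vs ++ st)) := by
            rw [List.cons_append, pvDfsB, if_neg hv]
          have h2 := IH f' (by omega) (adj.getD v []) (acc ++ [v]) (vs ++ st)
            (fun w hw => H v w hw) (by omega)
          have h3 : pvLoopA adj f' (acc ++ [v]) (adj.getD v [])
              = pvDfsA adj (f' + 1) acc v := by rw [pvDfsA]
          obtain ⟨t, ht⟩ := (pv_prefix adj (f' + 1)).1 acc v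
          have h4 := ihvs (pvDfsA adj (f' + 1) acc v) st
            (fun w hw => hmem w (List.mem_cons_of_mem v hw))
            (by
              rw [ht]
              calc (adj.keys.filter (fun k => !decide (k ∈ acc ++ t))).length
                  ≤ (adj.keys.filter (fun k => !decide (k ∈ acc))).length :=
                    pv_mA_mono adj.keys acc t
                _ ≤ f' + 1 := hf)
          rw [h1, h2, h3, h4, pvLoopA, if_neg hv]

-- ---- Dict facts needed for the MST adjacency invariant ----

theorem pv_keys_insert_mem {ν : Type} (d : PySem.Dict Int ν) (k : Int) (v : ν)
    (h : k ∈ d.keys) : (d.insert k v).keys = d.keys := by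
  have hc : d.contains k = true := by
    simp only [PySem.Dict.keys, List.mem_map] at h
    obtain ⟨p, hp, he⟩ := h
    simp only [PySem.Dict.contains, List.any_eq_true]
    exact ⟨p, hp, by simp [he]⟩
  simp only [PySem.Dict.insert, hc, if_true, PySem.Dict.keys, List.map_map]
  apply List.map_congr_left
  intro p _
  by_cases hb : (p.1 == k) = true
  · have he : p.1 = k := by simpa using hb
    simp only [Function.comp_apply, if_pos hb]
    exact he.symm
  · simp only [Function.comp_apply, if_neg hb]

theorem pv_items_insert {ν : Type} (P : ν → Prop) (d : PySem.Dict Int ν) (k : Int) (v : ν)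
    (hd : ∀ p ∈ d.items, P p.2) (hv : P v) :
    ∀ p ∈ (d.insert k v).items, P p.2 := by
  intro p hp
  simp only [PySem.Dict.insert] at hp
  by_cases hc : d.contains k = true
  · simp only [hc, if_true, List.mem_map] at hp
    obtain ⟨q, hq, he⟩ := hp
    by_cases hb : (q.1 == k) = true
    · rw [if_pos hb] at he; rw [← he]; exact hv
    · rw [if_neg hb] at he; rw [← he]; exact hd q hq
  · rw [if_neg hc] at hp
    have hp' : p ∈ d.items ++ [(k, v)] := hp
    rcases List.mem_append.mp hp' with hp2 | hp2
    · exact hd p hp2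
    · rw [List.mem_singleton.mp hp2]; exact hv

theorem pv_getD_mem_items (d : PySem.Dict Int (List Int)) (k v : Int)
    (h : v ∈ d.getD k []) : ∃ p ∈ d.items, v ∈ p.2 := by
  cases hx : d.items.find? (fun p => p.1 == k) with
  | none => simp [PySem.Dict.getD, PySem.Dict.get?, hx] at h
  | some q =>
    have hq : q ∈ d.items := List.mem_of_find?_eq_some hx
    refine ⟨q, hq, ?_⟩
    simpa [PySem.Dict.getD, PySem.Dict.get?, hx] using h

-- keys of a dict literal: first occurrences of the pair keys, in order
theorem pv_keys_ofList {ν : Type} (ps : List (Int × ν)) :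
    (PySem.Dict.ofList ps).keys = PySem.Set.ofList (ps.map Prod.fst) := by
  have h := PySem.Dict.keys_foldl_insert_key (l := ps) (key := Prod.fst)
    (f := fun _ p => p.2) (d := PySem.Dict.empty)
  rw [← PySem.Set.update_nil_left (ps.map Prod.fst)]
  exact h

theorem pv_mem_keys (coords : List (Int × Int)) (k : Int)
    (h : k ∈ coords.map Prod.fst) : k ∈ pvKeys coords := by
  rw [pvKeys, pv_keys_ofList]
  exact (PySem.Set.mem_ofList _ _).mpr h

-- all values of a dict built by updates satisfy P when the pairs' values do
theorem pv_update_items {ν : Type} (P : ν → Prop) :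
    ∀ (ps : List (Int × ν)) (d : PySem.Dict Int ν),
      (∀ p ∈ d.items, P p.2) → (∀ p ∈ ps, P p.2) →
      ∀ p ∈ (d.update ps).items, P p.2 := by
  intro ps
  induction ps with
  | nil => intro d hd _; exact hd
  | cons q ps ih =>
    intro d hd hps
    have h1 : ∀ p ∈ (d.insert q.1 q.2).items, P p.2 :=
      pv_items_insert P d q.1 q.2 hd (hps q List.mem_cons_self)
    exact ih (d.insert q.1 q.2) h1 (fun p hp => hps p (List.mem_cons_of_mem q hp))

-- every edge produced by the double loop has both endpoints in noeud
theorem pv_edges_inner (dd : PySem.Dict (Int × Int) Int) (N : List Int) (i : Int)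
    (hi : i ∈ N) :
    ∀ (l : List Int) (acc : List (Int × Int × Int)),
      (∀ j ∈ l, j ∈ N) → (∀ e ∈ acc, e.2.1 ∈ N ∧ e.2.2 ∈ N) →
      ∀ e ∈ l.foldl (fun acc j =>
          if i < j then acc ++ [(dd.getD (i, j) 0, i, j)] else acc) acc,
        e.2.1 ∈ N ∧ e.2.2 ∈ N := by
  intro l
  induction l with
  | nil => intro acc _ hacc; exact hacc
  | cons j l ih =>
    intro acc hl hacc
    simp only [List.foldl_cons]
    apply ih _ (fun x hx => hl x (List.mem_cons_of_mem j hx))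
    intro e he
    by_cases hij : i < j
    · rw [if_pos hij] at he
      rcases List.mem_append.mp he with he | he
      · exact hacc e he
      · rw [List.mem_singleton.mp he]
        exact ⟨hi, hl j List.mem_cons_self⟩
    · rw [if_neg hij] at he
      exact hacc e he

theorem pv_edges_mem (noeud : List Int) (dd : PySem.Dict (Int × Int) Int) :
    ∀ e ∈ pvEdges noeud dd, e.2.1 ∈ noeud ∧ e.2.2 ∈ noeud := by
  rw [pvEdges]
  have main : ∀ (l : List Int) (acc : List (Int × Int × Int)),
      (∀ i ∈ l, i ∈ noeud) → (∀ e ∈ acc, e.2.1 ∈ noeud ∧ e.2.2 ∈ noeud) →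
      ∀ e ∈ l.foldl (fun acc i => noeud.foldl (fun acc j =>
          if i < j then acc ++ [(dd.getD (i, j) 0, i, j)] else acc) acc) acc,
        e.2.1 ∈ noeud ∧ e.2.2 ∈ noeud := by
    intro l
    induction l with
    | nil => intro acc _ hacc; exact hacc
    | cons i l ih =>
      intro acc hl hacc
      simp only [List.foldl_cons]
      apply ih _ (fun x hx => hl x (List.mem_cons_of_mem i hx))
      exact pv_edges_inner dd noeud i (hl i List.mem_cons_self) noeud acc
        (fun j hj => hj) hacc
  exact main noeud [] (fun i hi => hi) (by simp)

-- one Kruskal step: the adjacency component keeps its keys and its values stay inside N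
theorem pv_kstep_adj (f : Nat) (N : List Int)
    (st : PySem.Dict Int Int × PySem.Dict Int Int × PySem.Dict Int (List Int))
    (e : Int × Int × Int)
    (hkeys : st.2.2.keys = N) (hitems : ∀ p ∈ st.2.2.items, ∀ v ∈ p.2, v ∈ N)
    (hi : e.2.1 ∈ N) (hj : e.2.2 ∈ N) :
    (pvKStep f st e).2.2.keys = N ∧
      (∀ p ∈ (pvKStep f st e).2.2.items, ∀ v ∈ p.2, v ∈ N) := by
  rw [pvKStep]
  dsimp only
  split
  · dsimp only
    set adj := st.2.2 with hadj
    have hval1 : ∀ v ∈ adj.getD e.2.1 [] ++ [e.2.2], v ∈ N := by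
      intro v hv
      rcases List.mem_append.mp hv with hv | hv
      · obtain ⟨p, hp, hvp⟩ := pv_getD_mem_items adj e.2.1 v hv
        exact hitems p hp v hvp
      · rw [List.mem_singleton.mp hv]; exact hj
    have hstep1 : ∀ p ∈ (adj.modify e.2.1 [] (· ++ [e.2.2])).items, ∀ v ∈ p.2, v ∈ N := by
      rw [PySem.Dict.modify]
      exact pv_items_insert (fun xs => ∀ v ∈ xs, v ∈ N) adj e.2.1 _ hitems hval1
    have hk1 : (adj.modify e.2.1 [] (· ++ [e.2.2])).keys = N := by
      rw [PySem.Dict.modify, pv_keys_insert_mem _ _ _ (by rw [hkeys]; exact hi)]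
      exact hkeys
    have hval2 : ∀ v ∈ (adj.modify e.2.1 [] (· ++ [e.2.2])).getD e.2.2 [] ++ [e.2.1], v ∈ N := by
      intro v hv
      rcases List.mem_append.mp hv with hv | hv
      · obtain ⟨p, hp, hvp⟩ := pv_getD_mem_items _ e.2.2 v hv
        exact hstep1 p hp v hvp
      · rw [List.mem_singleton.mp hv]; exact hi
    constructor
    · rw [PySem.Dict.modify, pv_keys_insert_mem _ _ _ (by rw [hk1]; exact hj)]
      exact hk1
    · rw [PySem.Dict.modify]
      exact pv_items_insert (fun xs => ∀ v ∈ xs, v ∈ N) _ e.2.2 _ hstep1 hval2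
  · exact ⟨hkeys, hitems⟩

theorem pv_kruskal_fold (f : Nat) (N : List Int) :
    ∀ (l : List (Int × Int × Int))
      (st : PySem.Dict Int Int × PySem.Dict Int Int × PySem.Dict Int (List Int)),
      st.2.2.keys = N → (∀ p ∈ st.2.2.items, ∀ v ∈ p.2, v ∈ N) →
      (∀ e ∈ l, e.2.1 ∈ N ∧ e.2.2 ∈ N) →
      (l.foldl (pvKStep f) st).2.2.keys = N ∧
        (∀ p ∈ (l.foldl (pvKStep f) st).2.2.items, ∀ v ∈ p.2, v ∈ N) := by
  intro l
  induction l with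
  | nil => intro st hk hv _; exact ⟨hk, hv⟩
  | cons e l ih =>
    intro st hk hv hl
    simp only [List.foldl_cons]
    obtain ⟨hk', hv'⟩ := pv_kstep_adj f N st e hk hv
      (hl e List.mem_cons_self).1 (hl e List.mem_cons_self).2
    exact ih _ hk' hv' (fun x hx => hl x (List.mem_cons_of_mem e hx))

-- the MST adjacency dict: keys are the distinct nodes and every entry is a node
theorem pv_adj_inv (coords : List (Int × Int)) (dist : List (Int × Int × Int)) :
    (pvBuildAdj coords dist).2.keys = PySem.Set.ofList (pvKeys coords) ∧
      (∀ u v, v ∈ (pvBuildAdj coords dist).2.getD u [] →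
        v ∈ (pvBuildAdj coords dist).2.keys) := by
  have hnd : ∀ (noeud : List Int) (dd : PySem.Dict (Int × Int) Int) (f : Nat),
      (pvKruskal f noeud (PySem.List.sorted (pvEdges noeud dd) (fun e => e.1))).keys
          = PySem.Set.ofList noeud ∧
        (∀ p ∈ (pvKruskal f noeud (PySem.List.sorted (pvEdges noeud dd) (fun e => e.1))).items,
          ∀ v ∈ p.2, v ∈ PySem.Set.ofList noeud) := by
    intro noeud dd f
    have hedge : ∀ e ∈ PySem.List.sorted (pvEdges noeud dd) (fun e => e.1),
        e.2.1 ∈ noeud ∧ e.2.2 ∈ noeud := by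
      intro e he
      exact pv_edges_mem noeud dd e
        ((PySem.List.sorted_perm (pvEdges noeud dd) (fun e => e.1) false).mem_iff.mp he)
    have hinitk : (PySem.Dict.ofList (noeud.map (fun v => (v, ([] : List Int))))).keys
        = PySem.Set.ofList noeud := by
      rw [pv_keys_ofList]
      congr 1
      rw [List.map_map]
      simp [Function.comp_def]
    have hinitv0 : ∀ p ∈ (PySem.Dict.empty.update (noeud.map (fun v => (v, ([] : List Int))))).items,
        ∀ v ∈ p.2, v ∈ noeud := by
      apply pv_update_items (fun xs => ∀ v ∈ xs, v ∈ noeud) _ PySem.Dict.empty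
      · intro p hp
        simp [PySem.Dict.empty] at hp
      · intro p hp
        obtain ⟨w, _, hw⟩ := List.mem_map.mp hp
        rw [← hw]
        simp
    have hinitv : ∀ p ∈ (PySem.Dict.ofList (noeud.map (fun v => (v, ([] : List Int))))).items,
        ∀ v ∈ p.2, v ∈ noeud := hinitv0
    obtain ⟨hk, hv⟩ := pv_kruskal_fold f (PySem.Set.ofList noeud)
      (PySem.List.sorted (pvEdges noeud dd) (fun e => e.1))
      (PySem.Dict.ofList (noeud.map (fun v => (v, v))),
       PySem.Dict.ofList (noeud.map (fun v => (v, (0 : Int)))),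
       PySem.Dict.ofList (noeud.map (fun v => (v, ([] : List Int)))))
      hinitk
      (fun p hp v hvp => (PySem.Set.mem_ofList _ _).mpr (hinitv p hp v hvp))
      (fun e he => ⟨(PySem.Set.mem_ofList _ _).mpr (hedge e he).1,
        (PySem.Set.mem_ofList _ _).mpr (hedge e he).2⟩)
    exact ⟨hk, hv⟩
  obtain ⟨hk, hv⟩ := hnd (pvKeys coords)
    (PySem.Dict.ofList (dist.map (fun t => ((t.1, t.2.1), t.2.2))))
    ((pvKeys coords).length + 1)
  refine ⟨hk, ?_⟩
  intro u v hv'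
  obtain ⟨p, hp, hvp⟩ :=
    pv_getD_mem_items ((pvBuildAdj coords dist).2) u v hv'
  show v ∈ (pvBuildAdj coords dist).2.keys
  have : (pvBuildAdj coords dist).2.keys = PySem.Set.ofList (pvKeys coords) := hk
  rw [this]
  exact hv p hp v hvp

-- ===== VERDICT (by name: the statement is the Claim_ definition above) =====
theorem solve_tsp_2approx_spec : Claim_equal_solve_tsp_2approx := by
  intro coords dist _ hpre
  unfold Spec_solve_tsp_2approx solve_tsp_2approx
  rw [pv_alt_adj]
  dsimp only
  obtain ⟨hkeys, H⟩ := pv_adj_inv coords dist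
  set adj := (pvBuildAdj coords dist).2 with hadj
  have hn1 : (pvBuildAdj coords dist).1 = pvKeys coords := by rw [pvBuildAdj]
  have h0 : (0 : Int) ∈ adj.keys := by
    rw [hkeys]
    exact (PySem.Set.mem_ofList _ _).mpr (pv_mem_keys coords 0 hpre.1)
  have hHk : ∀ u v, v ∈ adj.getD u [] → v ∈ adj.keys := H
  have hlen : adj.keys.length ≤ (pvBuildAdj coords dist).1.length := by
    rw [hkeys, hn1]
    exact PySem.Set.length_ofList_le _
  congr 1
  -- B's run
  have hB1 : pvDfsB adj [] [0] = pvDfsB adj [0] (adj.getD 0 [] ++ []) := by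
    rw [show ([0] : List Int) = 0 :: [] from rfl, pvDfsB, if_neg (by simp)]
    rfl
  have hB2 := pv_inner adj hHk (pvBuildAdj coords dist).1.length (adj.getD 0 []) [0] []
    (fun v hv => hHk 0 v hv)
    (le_trans (le_trans (List.length_filter_le _ _) (le_refl _)) hlen)
  have hB3 : pvDfsB adj (pvLoopA adj (pvBuildAdj coords dist).1.length [0] (adj.getD 0 [])) []
      = pvLoopA adj (pvBuildAdj coords dist).1.length [0] (adj.getD 0 []) := by
    rw [pvDfsB]
  -- A's run
  have hA1 : pvDfsA adj ((pvBuildAdj coords dist).1.length + 1) [] 0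
      = pvLoopA adj (pvBuildAdj coords dist).1.length [0] (adj.getD 0 []) := by
    rw [pvDfsA]
    rfl
  rw [hA1, hB1, hB2, hB3]
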